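-- pv_equiv track=rewrite | github.com/smetanadvorak/programming_problems | google_foobar/solution8.py | solution_bin
-- ===== SOURCE A (Python) =====
-- import itertools
--
-- def solution_bin(B,R):
--     # Slightly different solution. Realizes the initial idea and doesn't use sets.
--     bunnies = range(B)
--
--     # Special case: if no bunnies required, then they don't need keys and
--     # lexicographically the empty distribution is the best one.
--     if R == 0:
--         return [[] for i in bunnies]
--
--     # Special case of R == 1. All bunnies get the same key.
--     # Every bunny can open. No bunny (R-1=0 bunnies) cannot open.
--     if R == 1:
--         return [[0] for i in bunnies]
--
--
--
--     # Use a binary table to keep track of which bunny has which key.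
--     has_key = [[1] for i in range(B)] # Give every bunny the first key to initialize
--                                       # (we'll take it away later).
--     nkeys = 1
--
--     # Start testing every R-1 group.
--     # Principle: if such group has all keys, give a new key to everybody else.
--     groups = itertools.combinations(range(B), R-1)
--     for gr in groups:
--         # If this group can open the lock (has all keys) ...
--         if all([ sum([has_key[bunny][key] for bunny in gr]) for key in range(nkeys) ]):
--             # ... give a new key to other bunnies.
--             for bunny in bunnies:
--                 if bunny in gr:
--                     has_key[bunny].append(0)
--                 else:
--                     has_key[bunny].append(1)
--
--     # Take away the initial key
--     has_key = [d[1:]   for d in has_key]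
--     # Invert horizontal order of key tables indices for better lexicographic order
--     has_key = [d[::-1] for d in has_key]
--     # Get indices from binary tables
--     distribution = [[i for (i, has_key) in enumerate(bunny) if has_key] for bunny in has_key]
--     return distribution
-- ===== SOURCE B (Python) =====
-- import itertools
--
-- def solution_bin(B, R):
--     bunnies = range(B)
--     if R == 0:
--         return [[] for _ in bunnies]
--     if R == 1:
--         return [[0] for _ in bunnies]
--     # Every (R-1)-group must miss exactly one key, so assign key i to all
--     # bunnies outside the i-th combination (in reversed enumeration order).
--     combos = list(itertools.combinations(bunnies, R - 1))[::-1]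
--     return [[i for i, c in enumerate(combos) if b not in c] for b in bunnies]
-- ===== Notes on version B (the rewrite author's own statement) =====
-- stated objective: faster
-- what changed: A maintains a growing binary key table and, for every (R-1)-combination, re-tests feasibility by summing the table over all keys issued so far before appending a new key column; B observes that every combination passes that test, so it skips the table entirely and directly gives key i to every bunny outside the i-th combination of the reversed enumeration.
import Mathlib
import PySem

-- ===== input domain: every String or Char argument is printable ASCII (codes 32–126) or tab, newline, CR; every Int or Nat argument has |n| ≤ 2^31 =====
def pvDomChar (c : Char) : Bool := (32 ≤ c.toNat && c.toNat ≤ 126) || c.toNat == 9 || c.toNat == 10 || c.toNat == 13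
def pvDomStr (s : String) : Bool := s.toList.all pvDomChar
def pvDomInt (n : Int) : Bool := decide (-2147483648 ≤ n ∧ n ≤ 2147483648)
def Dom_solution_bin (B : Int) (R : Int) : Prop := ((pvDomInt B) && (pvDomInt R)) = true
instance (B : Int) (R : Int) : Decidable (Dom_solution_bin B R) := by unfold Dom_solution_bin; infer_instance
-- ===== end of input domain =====

-- B replaces A's quadratic feasibility test over all previous keys by directly giving
-- one key per (R-1)-combination to the bunnies outside it, in reversed enumeration order.

-- ===== PORT A =====
-- itertools.combinations(xs, r): same recursion as PySem.List.combinations plus CPython's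
-- immediate empty answer when r exceeds len(xs) (proved equal in pyCombinations_eq below)
def pyCombinations {α : Type} (xs : List α) (r : Nat) : List (List α) :=
  if xs.length < r then []
  else match xs, r with
    | _, 0 => [[]]
    | [], _ + 1 => []
    | x :: rest, r' + 1 =>
      (pyCombinations rest r').map (fun c => x :: c) ++ pyCombinations rest (r' + 1)
termination_by xs.length
decreasing_by all_goals simp_wf

-- loop body of A's 'for gr in groups' (mutating has_key/nkeys), as a named helper
def stepA (B : Int) (st : List (List Int) × Int) (gr : List Int) : List (List Int) × Int :=
  if ((PySem.List.pyRange 0 st.2 1).map (fun key =>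
        (gr.map (fun bunny =>
          PySem.List.pyGetD (PySem.List.pyGetD st.1 bunny []) key 0)).sum)).all (fun v => v != 0)
  then
    -- 'for bunny in bunnies: has_key[bunny].append(…)': bunnies = range(B) and has_key has
    -- length B, so the positional update is written as a zip with bunnies
    (((PySem.List.pyRange 0 B 1).zip st.1).map
        (fun p => p.2 ++ [if p.1 ∈ gr then (0 : Int) else 1]), st.2 + 1)
  else st

def solution_bin (B : Int) (R : Int) : List (List Int) :=
  let bunnies := PySem.List.pyRange 0 B 1
  if R == 0 then bunnies.map (fun _ => ([] : List Int))
  else if R == 1 then bunnies.map (fun _ => ([0] : List Int))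
  else
    let has_key0 : List (List Int) := (PySem.List.pyRange 0 B 1).map (fun _ => [(1 : Int)])
    let groups := pyCombinations (PySem.List.pyRange 0 B 1) (R - 1).toNat
    let st := groups.foldl (stepA B) (has_key0, 1)
    let hk1 := st.1.map (fun d => PySem.List.slice d (some 1) none)
    let hk2 := hk1.map (fun d => (PySem.List.slice? d none none (-1)).getD [])
    hk2.map (fun bunny =>
      (PySem.List.enumerate bunny 0).filterMap (fun p => if p.2 != 0 then some p.1 else none))

-- ===== PORT B =====
def solution_bin_alt (B : Int) (R : Int) : List (List Int) :=
  let bunnies := PySem.List.pyRange 0 B 1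
  if R == 0 then bunnies.map (fun _ => ([] : List Int))
  else if R == 1 then bunnies.map (fun _ => ([0] : List Int))
  else
    let combos := (PySem.List.slice?
        (pyCombinations bunnies (R - 1).toNat) none none (-1)).getD []
    bunnies.map (fun b =>
      (PySem.List.enumerate combos 0).filterMap (fun p => if b ∈ p.2 then none else some p.1))

-- ===== PRECONDITION & SPEC =====
-- Pre_ excludes R < 0, where itertools.combinations(range(B), R-1) raises ValueError in A
-- (and in B alike); A returns normally on every input with R ≥ 0.
def Pre_solution_bin (B : Int) (R : Int) : Prop := 0 ≤ R
instance (B : Int) (R : Int) : Decidable (Pre_solution_bin B R) := by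
  unfold Pre_solution_bin; infer_instance

def pvWitness_solution_bin : Int × Int := (5, 3)

def Spec_solution_bin (B : Int) (R : Int) (out : List (List Int)) : Prop := out = solution_bin_alt B R
instance (B : Int) (R : Int) (out : List (List Int)) : Decidable (Spec_solution_bin B R out) := by
  unfold Spec_solution_bin; infer_instance

-- ===== CLAIM (what is proved, stated in full; the proofs are below) =====
def Claim_equal_solution_bin : Prop := ∀ (B : Int) (R : Int), Dom_solution_bin B R → Pre_solution_bin B R → Spec_solution_bin B R (solution_bin B R)

-- ===== LEMMAS AND PROOFS =====

-- 0/1 key indicator: did combination c withhold its key from bunny b?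
def keyval (c : List Int) (b : Int) : Int := if b ∈ c then 0 else 1

-- bunny b's binary row after the combinations in p have been processed
def rowOf (p : List (List Int)) (b : Int) : List Int := 1 :: p.map (fun c => keyval c b)

lemma pyCombinations_eq {α : Type} (xs : List α) (r : Nat) :
    pyCombinations xs r = PySem.List.combinations xs r := by
  induction xs generalizing r with
  | nil =>
    cases r with
    | zero => simp [pyCombinations, PySem.List.combinations_zero]
    | succ r' => simp [pyCombinations, PySem.List.combinations_nil_succ]
  | cons x rest ih =>
    cases r with
    | zero => simp [pyCombinations, PySem.List.combinations_zero]
    | succ r' =>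
      rw [pyCombinations]
      by_cases h : (x :: rest).length < r' + 1
      · rw [if_pos h]
        exact (PySem.List.combinations_eq_nil_of_length_lt _ h).symm
      · rw [if_neg h, PySem.List.combinations_cons_succ, ih, ih]

lemma nodup_combinations {α : Type} (xs : List α) (h : xs.Nodup) (k : Nat) :
    (PySem.List.combinations xs k).Nodup := by
  induction xs generalizing k with
  | nil =>
    cases k with
    | zero => simp [PySem.List.combinations_zero]
    | succ k => simp [PySem.List.combinations_nil_succ]
  | cons x xs ih =>
    cases k with
    | zero => simp [PySem.List.combinations_zero]
    | succ k =>
      rw [PySem.List.combinations_cons_succ]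
      rcases List.nodup_cons.mp h with ⟨hx, hxs⟩
      refine List.Nodup.append ?_ (ih hxs _) ?_
      · exact (ih hxs k).map (fun a b hab => by injection hab)
      · intro a ha hb
        rcases List.mem_map.mp ha with ⟨c, _, rfl⟩
        have hsub := (PySem.List.mem_combinations_iff _ _ _).mp hb |>.1
        exact hx (hsub.subset List.mem_cons_self)

lemma enumerate_map {α β : Type} (f : α → β) (l : List α) (s : Int) :
    PySem.List.enumerate (l.map f) s = (PySem.List.enumerate l s).map (fun p => (p.1, f p.2)) := by
  induction l generalizing s with
  | nil => simp [PySem.List.enumerate_nil]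
  | cons x xs ih => simp [PySem.List.enumerate_cons, ih]

lemma zip_map_self {α β : Type} (l : List α) (f : α → β) :
    l.zip (l.map f) = l.map (fun x => (x, f x)) := by
  induction l with
  | nil => simp
  | cons x xs ih => simp [ih]

-- two equal-length combinations of the same sorted list, one contained in the other, coincide
lemma combo_eq_of_subset (xs : List Int) (hs : xs.Pairwise (· < ·)) {k : Nat}
    {c g : List Int} (hc : c ∈ PySem.List.combinations xs k)
    (hg : g ∈ PySem.List.combinations xs k) (hsub : g ⊆ c) : g = c := by
  rcases (PySem.List.mem_combinations_iff _ _ _).mp hc with ⟨hcs, hcl⟩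
  rcases (PySem.List.mem_combinations_iff _ _ _).mp hg with ⟨hgs, hgl⟩
  have hnd : xs.Nodup := hs.nodup
  have hperm : g.Perm c :=
    ((hgs.nodup hnd).subperm hsub).perm_of_length_le (by omega)
  exact List.Perm.eq_of_pairwise (fun a b _ _ h1 h2 => le_antisymm h1.le h2.le)
    (hs.sublist hgs) (hs.sublist hcs) hperm

-- A's feasibility test succeeds on gr whenever gr is a fresh combination
lemma condTrueA (B : Int) (k : Nat) (hk1 : 1 ≤ k) (p : List (List Int)) (gr : List Int)
    (hpm : ∀ c ∈ p, c ∈ PySem.List.combinations (PySem.List.pyRange 0 B 1) k)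
    (hgm : gr ∈ PySem.List.combinations (PySem.List.pyRange 0 B 1) k)
    (hfresh : gr ∉ p) :
    ((PySem.List.pyRange 0 (1 + (p.length : Int)) 1).map (fun key =>
        (gr.map (fun bunny =>
          PySem.List.pyGetD
            (PySem.List.pyGetD ((PySem.List.pyRange 0 B 1).map (rowOf p)) bunny []) key 0)).sum)).all
      (fun v => v != 0) = true := by
  rw [List.all_eq_true]
  intro v hv
  rcases List.mem_map.mp hv with ⟨key, hkey, rfl⟩
  rw [bne_iff_ne]
  rcases PySem.List.mem_pyRange_one.mp hkey with ⟨hkey0, hkey1⟩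
  have hglen : gr.length = k := ((PySem.List.mem_combinations_iff _ _ _).mp hgm).2
  have hget : ∀ b ∈ gr,
      PySem.List.pyGetD ((PySem.List.pyRange 0 B 1).map (rowOf p)) b [] = rowOf p b := by
    intro b hb
    have hbx : b ∈ PySem.List.pyRange 0 B 1 :=
      ((PySem.List.mem_combinations_iff _ _ _).mp hgm).1.subset hb
    rcases PySem.List.mem_pyRange_one.mp hbx with ⟨hb0, hbB⟩
    have hBn : (0:Int) ≤ B := le_trans hb0 hbB.le
    have hbeq : b = ((b.toNat : Nat) : Int) := (Int.toNat_of_nonneg hb0).symm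
    have hBeq : B = ((B.toNat : Nat) : Int) := (Int.toNat_of_nonneg hBn).symm
    conv_lhs => rw [hbeq, hBeq]
    rw [PySem.List.pyGetD_map_pyRange _ _ _ _ (by omega : b.toNat < B.toNat)]
    rw [← hbeq]
  have hmapeq : gr.map (fun bunny =>
        PySem.List.pyGetD
          (PySem.List.pyGetD ((PySem.List.pyRange 0 B 1).map (rowOf p)) bunny []) key 0)
      = gr.map (fun bunny => (rowOf p bunny).getD key.toNat 0) := by
    apply List.map_congr_left
    intro b hb
    rw [hget b hb]
    have hkeq : key = ((key.toNat : Nat) : Int) := (Int.toNat_of_nonneg hkey0).symm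
    conv_lhs => rw [hkeq]
    rw [PySem.List.pyGetD_natCast]
  rw [hmapeq]
  rcases Nat.eq_zero_or_pos key.toNat with hz | hpos
  · -- key 0: everybody holds the initial key
    simp only [hz, rowOf, List.getD_cons_zero]
    rw [PySem.List.sum_map_const_int]
    have : 1 ≤ gr.length := by omega
    intro hcontra
    have := mul_eq_zero.mp hcontra
    omega
  · -- key j+1: the key withheld from combination p[j]
    obtain ⟨j, hj'⟩ : ∃ j, key.toNat = j + 1 := ⟨key.toNat - 1, by omega⟩
    have hj : j < p.length := by omega
    simp only [hj', rowOf, List.getD_cons_succ]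
    have hgd : ∀ b : Int, (p.map (fun c => keyval c b)).getD j 0 = keyval p[j] b := by
      intro b
      rw [List.getD_eq_getElem _ _ (by simpa using hj), List.getElem_map]
    simp only [hgd]
    have hcnt : (gr.map (fun b => keyval p[j] b)).sum
        = ((gr.countP (fun b => !decide (b ∈ p[j])) : Nat) : Int) := by
      rw [← PySem.List.sum_map_ite_one_zero (fun b => !decide (b ∈ p[j])) gr]
      apply congrArg
      apply List.map_congr_left
      intro b _
      by_cases hbc : b ∈ p[j] <;> simp [keyval, hbc]
    rw [hcnt]
    rw [Int.natCast_ne_zero]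
    intro hzero
    have hall : ∀ b ∈ gr, b ∈ p[j] := by
      intro b hb
      have := List.countP_eq_zero.mp hzero b hb
      simpa using this
    have hcj : p[j] ∈ PySem.List.combinations (PySem.List.pyRange 0 B 1) k :=
      hpm _ (List.getElem_mem hj)
    have : gr = p[j] :=
      combo_eq_of_subset (PySem.List.pyRange 0 B 1)
        (PySem.List.pairwise_lt_pyRange_one 0 B) hcj hgm hall
    exact hfresh (this ▸ List.getElem_mem hj)

lemma fold_char (B : Int) (k : Nat) (hk1 : 1 ≤ k) :
    ∀ (s p : List (List Int)),
      (p ++ s).Sublist (PySem.List.combinations (PySem.List.pyRange 0 B 1) k) →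
      s.foldl (stepA B) ((PySem.List.pyRange 0 B 1).map (rowOf p), 1 + (p.length : Int)) =
        ((PySem.List.pyRange 0 B 1).map (rowOf (p ++ s)), 1 + ((p ++ s).length : Int)) := by
  intro s
  induction s with
  | nil => intro p _; simp
  | cons gr s' ih =>
    intro p hsub
    have hmem : ∀ c ∈ p ++ gr :: s',
        c ∈ PySem.List.combinations (PySem.List.pyRange 0 B 1) k :=
      fun c hc => hsub.subset hc
    have hnd : (p ++ gr :: s').Nodup :=
      hsub.nodup (nodup_combinations _ (PySem.List.nodup_pyRange_one 0 B) k)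
    have hfresh : gr ∉ p := by
      intro hgp
      exact (List.disjoint_of_nodup_append hnd) hgp List.mem_cons_self
    rw [List.foldl_cons]
    have hcond := condTrueA B k hk1 p gr
      (fun c hc => hmem c (List.mem_append_left _ hc)) (hmem gr (by simp)) hfresh
    have hstep : stepA B ((PySem.List.pyRange 0 B 1).map (rowOf p), 1 + (p.length : Int)) gr
        = ((PySem.List.pyRange 0 B 1).map (rowOf (p ++ [gr])), 1 + ((p ++ [gr]).length : Int)) := by
      unfold stepA
      rw [if_pos hcond]
      refine Prod.ext ?_ ?_
      · show (((PySem.List.pyRange 0 B 1).zip ((PySem.List.pyRange 0 B 1).map (rowOf p))).map _ : List (List Int)) = _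
        rw [zip_map_self, List.map_map]
        apply List.map_congr_left
        intro b _
        simp [rowOf, keyval]
      · show (1 : Int) + (p.length : Int) + 1 = 1 + ((p ++ [gr]).length : Int)
        simp only [List.length_append, List.length_singleton]
        push_cast
        ring
    rw [hstep]
    have := ih (p ++ [gr]) (by simpa using hsub)
    simpa using this

-- ===== VERDICT (by name: the statement is the Claim_ definition above) =====
theorem solution_bin_spec : Claim_equal_solution_bin := by
  intro B R _ hpre
  unfold Spec_solution_bin solution_bin solution_bin_alt
  by_cases h0 : R = 0
  · simp [h0]
  by_cases h1 : R = 1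
  · simp [h1]
  have hR2 : 2 ≤ R := by
    unfold Pre_solution_bin at hpre
    omega
  simp only [beq_iff_eq, h0, h1, if_false]
  simp only [pyCombinations_eq]
  have hk1 : 1 ≤ (R - 1).toNat := by omega
  have hinit : (PySem.List.pyRange 0 B 1).map (fun _ => [(1:Int)])
      = (PySem.List.pyRange 0 B 1).map (rowOf []) := by
    apply List.map_congr_left
    intro b _
    simp [rowOf]
  have hfold := fold_char B (R - 1).toNat hk1
    (PySem.List.combinations (PySem.List.pyRange 0 B 1) (R - 1).toNat) []
    (by simp)
  simp only [List.nil_append, List.length_nil, Nat.cast_zero, add_zero] at hfold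
  rw [hinit, hfold]
  dsimp only
  rw [PySem.List.slice?_none_none_neg_one, Option.getD_some]
  simp only [List.map_map]
  apply List.map_congr_left
  intro b _
  simp only [Function.comp_apply]
  rw [PySem.List.slice_from _ (by norm_num : (0:Int) ≤ 1)]
  simp only [rowOf, Int.toNat_one, List.drop_succ_cons, List.drop_zero]
  rw [PySem.List.slice?_none_none_neg_one, Option.getD_some]
  rw [← List.map_reverse, enumerate_map, List.filterMap_map]
  apply List.filterMap_congr
  intro q _
  simp only [Function.comp_apply]
  by_cases hbq : b ∈ q.2 <;> simp [keyval, hbq]
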